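-- pv_equiv track=rewrite | github.com/bagusanugrah/mesin-pencari-dokumen | TemuBalik.py | hapusImbuhanAkhiran
-- ===== SOURCE A (Python) =====
-- def hapusImbuhanAkhiran(kata, set_kamus):
--     akhiran = ["i", "kan", "an"]
--     #set kamus
--     kamus = set_kamus
--
--     #baca setiap akhiran kata dari list akhiran
--     for a in akhiran:
--         #jika kata berakhiran akhiran kata yang sedang dibaca
--         if kata.endswith(a):
--             #hapus akhiran kata dari kata tersebut
--             kata_dasar = kata[:-len(a)]
--             #jika kata yang sudah dihapus akhirannya tersebut ada di kamus
--             if kata_dasar in kamus: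
--                 #return kata tersebut
--                 return kata_dasar
--
--     #baca setiap akhiran kata dari list akhiran
--     for a in akhiran:
--         #jika kata berakhiran akhiran kata yang sedang dibaca
--         if kata.endswith(a):
--             #hapus akhiran kata dari kata tersebut kemudian return kata tersebut
--             return kata[:-len(a)]
--     #return apa adanya
--     return kata
-- ===== SOURCE B (Python) =====
-- def hapusImbuhanAkhiran(kata, set_kamus):
--     preferred = None
--     fallback = None
--     for a in ["i", "kan", "an"]:
--         if kata.endswith(a):
--             root = kata[:-len(a)]
--             if fallback is None:
--                 fallback = root
--             if preferred is None and root in set_kamus: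
--                 preferred = root
--     if preferred is not None:
--         return preferred
--     if fallback is not None:
--         return fallback
--     return kata
-- ===== Notes on version B (the rewrite author's own statement) =====
-- stated objective: simpler
-- what changed: A's two sequential early-return scans over the suffix list are merged into one stateful pass that records the first dictionary-backed root (preferred) and the first merely-matching root (fallback), choosing preferred, then fallback, then the word itself.
import Mathlib
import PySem

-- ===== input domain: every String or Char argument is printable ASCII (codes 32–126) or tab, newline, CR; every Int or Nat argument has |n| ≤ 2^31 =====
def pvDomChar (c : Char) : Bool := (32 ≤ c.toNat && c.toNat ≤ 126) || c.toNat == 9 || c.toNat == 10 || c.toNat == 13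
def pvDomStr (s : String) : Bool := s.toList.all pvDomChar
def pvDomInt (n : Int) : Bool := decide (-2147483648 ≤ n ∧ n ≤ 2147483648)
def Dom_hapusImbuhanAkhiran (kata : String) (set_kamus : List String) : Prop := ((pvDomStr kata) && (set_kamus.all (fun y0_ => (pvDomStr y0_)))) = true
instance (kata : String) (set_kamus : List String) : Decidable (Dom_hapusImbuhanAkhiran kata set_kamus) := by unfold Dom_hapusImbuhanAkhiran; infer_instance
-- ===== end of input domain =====

-- B merges A's two sequential early-return scans over the suffix list into one stateful pass
-- (first dictionary-backed root "preferred", first matching root "fallback"); objective: simpler.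


-- ===== PORT A =====
-- first loop: return the first suffix-stripped root that is in the dictionary
def pvALoop1 (kata : String) (kamus : List String) : List String → Option String
  | [] => none
  | a :: rest =>
    if PySem.Str.endswith kata a then
      let kata_dasar := PySem.Str.slice kata none (some (-(PySem.Str.len a)))
      if kamus.contains kata_dasar then some kata_dasar else pvALoop1 kata kamus rest
    else pvALoop1 kata kamus rest

-- second loop: return the first suffix-stripped root
def pvALoop2 (kata : String) : List String → Option String
  | [] => none
  | a :: rest =>
    if PySem.Str.endswith kata a then
      some (PySem.Str.slice kata none (some (-(PySem.Str.len a))))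
    else pvALoop2 kata rest

def hapusImbuhanAkhiran (kata : String) (set_kamus : List String) : String :=
  let akhiran := ["i", "kan", "an"]
  let kamus := set_kamus
  match pvALoop1 kata kamus akhiran with
  | some r => r
  | none =>
    match pvALoop2 kata akhiran with
    | some r => r
    | none => kata

-- ===== PORT B =====
-- one pass, state = (preferred, fallback)
def pvBStep (kata : String) (set_kamus : List String)
    (st : Option String × Option String) (a : String) : Option String × Option String :=
  if PySem.Str.endswith kata a then
    let root := PySem.Str.slice kata none (some (-(PySem.Str.len a)))
    let fallback := match st.2 with | none => some root | some x => some x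
    let preferred := match st.1 with
      | none => if set_kamus.contains root then some root else none
      | some x => some x
    (preferred, fallback)
  else st

def hapusImbuhanAkhiran_alt (kata : String) (set_kamus : List String) : String :=
  let st := List.foldl (pvBStep kata set_kamus) (none, none) ["i", "kan", "an"]
  match st.1 with
  | some r => r
  | none =>
    match st.2 with
    | some r => r
    | none => kata

-- ===== PRECONDITION & SPEC =====
def Spec_hapusImbuhanAkhiran (kata : String) (set_kamus : List String) (out : String) : Prop := out = hapusImbuhanAkhiran_alt kata set_kamus
instance (kata : String) (set_kamus : List String) (out : String) : Decidable (Spec_hapusImbuhanAkhiran kata set_kamus out) := by unfold Spec_hapusImbuhanAkhiran; infer_instance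

-- ===== CLAIM (what is proved, stated in full; the proofs are below) =====
def Claim_equal_hapusImbuhanAkhiran : Prop := ∀ (kata : String) (set_kamus : List String), Dom_hapusImbuhanAkhiran kata set_kamus → Spec_hapusImbuhanAkhiran kata set_kamus (hapusImbuhanAkhiran kata set_kamus)

-- ===== LEMMAS AND PROOFS =====

-- ===== VERDICT (by name: the statement is the Claim_ definition above) =====
theorem hapusImbuhanAkhiran_spec : Claim_equal_hapusImbuhanAkhiran := by
  intro kata set_kamus _
  unfold Spec_hapusImbuhanAkhiran hapusImbuhanAkhiran hapusImbuhanAkhiran_alt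
  simp only [pvALoop1, pvALoop2, List.foldl, pvBStep]
  split_ifs <;> rfl
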